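-- pv_equiv track=rewrite | github.com/yramirezc/lib-annotated-attack-trees | facts_txt_2_prolog.py | adaptGuarantees2PrologSyntax
-- ===== SOURCE A (Python) =====
-- def adaptGuarantees2PrologSyntax(txt_args):
--     replacements = {'-': '_', '.': '_dot_', ':': '_colon_', '=': '_eq_', '\'': '_apostr_', '@': '_at_', '#': '_sharp_', '/': '_slash_', '\\': '_bckslash_'}
--     correct_args = txt_args.lower().replace('{', '[').replace('}', ']')    # Plain text sets to Prolog lists
--     for repl in replacements:
--         correct_args = correct_args.replace(repl, replacements[repl])
--     correct_args = correct_args.replace(',_', ',z_').replace('[_', '[z_')   # Remove false variables introduced by previous replacements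
--     for char in '0123456789':
--         correct_args = correct_args.replace(',' + char, ',n_' + char)
--         correct_args = correct_args.replace('[' + char, '[n_' + char)
--     return correct_args
-- ===== SOURCE B (Python) =====
-- def adaptGuarantees2PrologSyntax(txt_args):
--     # One left-to-right pass: map each (lowercased) char through the table and
--     # insert the 'z'/'n_' fixup right away when the previous emitted chunk was ',' or '['.
--     mapping = {'{': '[', '}': ']', '-': '_', '.': '_dot_', ':': '_colon_', '=': '_eq_',
--                '\'': '_apostr_', '@': '_at_', '#': '_sharp_', '/': '_slash_', '\\': '_bckslash_'}
--     pieces = []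
--     after_opener = False  # previously emitted chunk was ',' or '['
--     for ch in txt_args:
--         low = ch.lower()
--         m = mapping.get(low, low)
--         if after_opener:
--             if m[0] == '_':
--                 pieces.append('z')
--             elif '0' <= m[0] <= '9':
--                 pieces.append('n_')
--         pieces.append(m)
--         after_opener = m == ',' or m == '['
--     return ''.join(pieces)
-- ===== Notes on version B (the rewrite author's own statement) =====
-- stated objective: alternative
-- what changed: A rescans the whole string 33 times (lowercase and brace passes, nine dict replacements, two underscore fixups and twenty digit fixups, each a full str.replace pass); B builds the result in a single left-to-right pass that maps each character through one table and emits the variable/number fixup prefix immediately whenever the previous emitted chunk was a comma or an opening bracket.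
import Mathlib
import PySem

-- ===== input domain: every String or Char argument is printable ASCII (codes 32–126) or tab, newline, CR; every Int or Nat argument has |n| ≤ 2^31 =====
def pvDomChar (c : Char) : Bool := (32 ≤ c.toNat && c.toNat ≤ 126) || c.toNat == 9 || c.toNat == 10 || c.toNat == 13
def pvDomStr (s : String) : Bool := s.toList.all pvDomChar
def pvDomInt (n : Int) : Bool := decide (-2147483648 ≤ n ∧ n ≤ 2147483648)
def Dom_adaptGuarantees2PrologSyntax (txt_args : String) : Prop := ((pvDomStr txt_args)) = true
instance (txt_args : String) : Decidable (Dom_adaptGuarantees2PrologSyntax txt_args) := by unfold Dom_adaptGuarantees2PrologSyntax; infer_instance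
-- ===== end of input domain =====

-- B replaces A's 13 sequential whole-string `.replace` passes (plus a 10-digit loop of 20 more)
-- with one left-to-right pass that maps each character and inserts the 'z'/'n_' fixups on the fly.

-- ===== PORT A =====
-- the replacements dict of A, in insertion order (Python 3 dicts iterate in insertion order)
def pvReplacementsA : List (String × String) :=
  [("-", "_"), (".", "_dot_"), (":", "_colon_"), ("=", "_eq_"), ("'", "_apostr_"),
   ("@", "_at_"), ("#", "_sharp_"), ("/", "_slash_"), ("\\", "_bckslash_")]

def adaptGuarantees2PrologSyntax (txt_args : String) : String :=
  let correct_args := PySem.Str.replace (PySem.Str.replace (PySem.Str.lower txt_args) "{" "[") "}" "]"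
  let correct_args := pvReplacementsA.foldl (fun s p => PySem.Str.replace s p.1 p.2) correct_args
  let correct_args := PySem.Str.replace (PySem.Str.replace correct_args ",_" ",z_") "[_" "[z_"
  let correct_args := ("0123456789".toList).foldl (fun s ch =>
    PySem.Str.replace (PySem.Str.replace s ("," ++ String.ofList [ch]) (",n_" ++ String.ofList [ch]))
      ("[" ++ String.ofList [ch]) ("[n_" ++ String.ofList [ch])) correct_args
  correct_args

-- ===== PORT B =====
-- B's mapping dict lookup (keys in Source B's dict order), with the dict's default (the char itself)
def pvMapB (c : Char) : List Char :=
  if c = '{' then ['['] else if c = '}' then [']']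
  else if c = '-' then ['_'] else if c = '.' then ['_','d','o','t','_']
  else if c = ':' then ['_','c','o','l','o','n','_'] else if c = '=' then ['_','e','q','_']
  else if c = '\'' then ['_','a','p','o','s','t','r','_'] else if c = '@' then ['_','a','t','_']
  else if c = '#' then ['_','s','h','a','r','p','_'] else if c = '/' then ['_','s','l','a','s','h','_']
  else if c = '\\' then ['_','b','c','k','s','l','a','s','h','_'] else [c]

-- the fixup piece Source B appends before m when after_opener holds
def pvPreB (m : List Char) : List Char :=
  match m with
  | [] => []
  | d :: _ => if d = '_' then ['z'] else if '0' ≤ d ∧ d ≤ '9' then ['n','_'] else []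

-- Source B's loop over the characters, carrying the after_opener flag
def pvGoB (flag : Bool) : List Char → List Char
  | [] => []
  | c :: t =>
    let m := pvMapB (PySem.Chars.lowerChar c)
    (if flag then pvPreB m else []) ++ m ++ pvGoB (m = [','] || m = ['[']) t

def adaptGuarantees2PrologSyntax_alt (txt_args : String) : String :=
  String.ofList (pvGoB false txt_args.toList)

-- ===== PRECONDITION & SPEC =====
def Spec_adaptGuarantees2PrologSyntax (txt_args : String) (out : String) : Prop := out = adaptGuarantees2PrologSyntax_alt txt_args
instance (txt_args : String) (out : String) : Decidable (Spec_adaptGuarantees2PrologSyntax txt_args out) := by unfold Spec_adaptGuarantees2PrologSyntax; infer_instance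

-- ===== CLAIM (what is proved, stated in full; the proofs are below) =====
def Claim_equal_adaptGuarantees2PrologSyntax : Prop := ∀ (txt_args : String), Dom_adaptGuarantees2PrologSyntax txt_args → Spec_adaptGuarantees2PrologSyntax txt_args (adaptGuarantees2PrologSyntax txt_args)

-- ===== LEMMAS AND PROOFS =====
def repSingle (a : Char) (new : List Char) : List Char → List Char
  | [] => []
  | c :: t => if c = a then new ++ repSingle a new t else c :: repSingle a new t

lemma go_single (a : Char) (new : List Char) :
    ∀ fuel l acc, l.length ≤ fuel →
      PySem.Chars.replace.go [a] new fuel l acc = acc.reverse ++ repSingle a new l := by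
  intro fuel
  induction fuel with
  | zero => intro l acc h; simp at h; subst h; simp [PySem.Chars.replace.go, repSingle]
  | succ n ih =>
    intro l acc h
    cases l with
    | nil => simp [PySem.Chars.replace.go, repSingle]
    | cons c t =>
      simp only [PySem.Chars.replace.go]
      by_cases hc : c = a
      · subst hc
        simp only [List.isPrefixOf, BEq.rfl, Bool.and_eq_true]
        rw [ih _ _ (by simpa using Nat.le_of_succ_le_succ h)]
        simp [repSingle]
      · have : List.isPrefixOf [a] (c :: t) = false := by
          simp [List.isPrefixOf]; intro h'; exact absurd h'.symm hc
        rw [if_neg (by simp [this])]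
        rw [ih _ _ (by simpa using Nat.le_of_succ_le_succ h)]
        simp [repSingle, hc]

lemma replace_single (a : Char) (new l : List Char) :
    PySem.Chars.replace l [a] new = repSingle a new l := by
  rw [PySem.Chars.replace]
  simp [go_single a new l.length l [] (le_refl _)]
def repPair (a b : Char) (w : List Char) : List Char → List Char
  | [] => []
  | [c] => [c]
  | c :: d :: t => if c = a ∧ d = b then c :: (w ++ d :: repPair a b w t) else c :: repPair a b w (d :: t)

lemma go_pair (a b : Char) (w : List Char) :
    ∀ fuel l acc, l.length ≤ fuel →
      PySem.Chars.replace.go [a, b] (a :: w ++ [b]) fuel l acc = acc.reverse ++ repPair a b w l := by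
  intro fuel
  induction fuel with
  | zero => intro l acc h; simp at h; subst h; simp [PySem.Chars.replace.go, repPair]
  | succ n ih =>
    intro l acc h
    match l with
    | [] => simp [PySem.Chars.replace.go, repPair]
    | [c] =>
      have hpre : List.isPrefixOf [a, b] [c] = false := by simp [List.isPrefixOf]
      simp only [PySem.Chars.replace.go, hpre, Bool.false_eq_true, if_false]
      rw [ih [] _ (by simp)]
      simp [repPair]
    | c :: d :: t =>
      simp only [PySem.Chars.replace.go]
      by_cases hc : c = a ∧ d = b
      · obtain ⟨hc1, hc2⟩ := hc; subst hc1; subst hc2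
        have hpre : List.isPrefixOf [c, d] (c :: d :: t) = true := by simp [List.isPrefixOf]
        rw [if_pos hpre]
        have hdrop : List.drop [c, d].length (c :: d :: t) = t := by simp
        rw [hdrop, ih t _ (by simp at h ⊢; omega)]
        simp [repPair]
      · have hpre : List.isPrefixOf [a, b] (c :: d :: t) = false := by
          simp [List.isPrefixOf]
          intro h1 h2; exact hc ⟨h1.symm, h2.symm⟩
        rw [if_neg (by simp [hpre])]
        rw [ih (d :: t) _ (by simp at h ⊢; omega)]
        simp [repPair, hc]

lemma replace_pair (a b : Char) (w l : List Char) :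
    PySem.Chars.replace l [a, b] (a :: w ++ [b]) = repPair a b w l := by
  rw [PySem.Chars.replace]
  simpa using go_pair a b w l.length l [] (le_refl _)
lemma repSingle_flatMap (a : Char) (new l : List Char) :
    repSingle a new l = l.flatMap (fun c => if c = a then new else [c]) := by
  induction l with
  | nil => simp [repSingle]
  | cons c t ih => by_cases hc : c = a <;> simp [repSingle, hc, ih]

set_option maxHeartbeats 2000000 in
lemma stage_map (l : List Char) :
    (repSingle '\\' ['_','b','c','k','s','l','a','s','h','_']
      (repSingle '/' ['_','s','l','a','s','h','_']
        (repSingle '#' ['_','s','h','a','r','p','_']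
          (repSingle '@' ['_','a','t','_']
            (repSingle '\'' ['_','a','p','o','s','t','r','_']
              (repSingle '=' ['_','e','q','_']
                (repSingle ':' ['_','c','o','l','o','n','_']
                  (repSingle '.' ['_','d','o','t','_']
                    (repSingle '-' ['_']
                      (repSingle '}' [']']
                        (repSingle '{' ['['] (List.map PySem.Chars.lowerChar l)))))))))))) =
    l.flatMap (fun c => pvMapB (PySem.Chars.lowerChar c)) := by
  simp only [repSingle_flatMap, List.flatMap_map, List.flatMap_assoc]
  apply List.flatMap_congr
  intro c _
  generalize PySem.Chars.lowerChar c = d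
  unfold pvMapB
  split_ifs with h1 h2 h3 h4 h5 h6 h7 h8 h9 h10 h11 <;>
    first
      | (subst_vars; decide)
      | simp_all

lemma digit_cases (d : Char) (h1 : '0' ≤ d) (h2 : d ≤ '9') :
    d = '0' ∨ d = '1' ∨ d = '2' ∨ d = '3' ∨ d = '4' ∨ d = '5' ∨ d = '6' ∨ d = '7' ∨ d = '8' ∨ d = '9' := by
  rw [Char.le_def] at h1 h2
  have h3 : 48 ≤ d.toNat := h1
  have h4 : d.toNat ≤ 57 := h2
  have h : d.toNat = 48 ∨ d.toNat = 49 ∨ d.toNat = 50 ∨ d.toNat = 51 ∨ d.toNat = 52 ∨ d.toNat = 53 ∨ d.toNat = 54 ∨ d.toNat = 55 ∨ d.toNat = 56 ∨ d.toNat = 57 := by omega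
  rcases h with h|h|h|h|h|h|h|h|h|h <;> (rw [← Char.ofNat_toNat d, h]; decide)
def pvLook : List ((Char × Char) × List Char) → (Char × Char) → Option (List Char)
  | [], _ => none
  | (k, w) :: r, p => if p = k then some w else pvLook r p

def pvIns (rules : List ((Char × Char) × List Char)) (prev : Option Char) (c : Char) : List Char :=
  match prev with
  | none => []
  | some p => (pvLook rules (p, c)).getD []

def pvPins (rules : List ((Char × Char) × List Char)) : Option Char → List Char → List Char
  | _, [] => []
  | prev, c :: t => pvIns rules prev c ++ c :: pvPins rules (some c) t

def pvLastOf : Option Char → List Char → Option Char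
  | prev, [] => prev
  | _, c :: t => pvLastOf (some c) t

def pvNoFire (r : List ((Char × Char) × List Char)) : Option Char → List Char → Bool
  | _, [] => true
  | prev, c :: t => (pvIns r prev c).isEmpty && pvNoFire r (some c) t

def pvChainPairs : List Char → List (Char × Char)
  | [] => []
  | [_] => []
  | a :: b :: t => (a, b) :: pvChainPairs (b :: t)

def pvCompat (r1 r2 : List ((Char × Char) × List Char)) : Bool :=
  r1.all (fun kw => !kw.2.isEmpty &&
    (pvChainPairs (kw.1.1 :: kw.2 ++ [kw.1.2])).all (fun p => (pvLook r2 p).isNone))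

lemma pvLook_append (r1 r2 : List ((Char × Char) × List Char)) (p : Char × Char) :
    pvLook (r1 ++ r2) p = (pvLook r1 p).orElse (fun _ => pvLook r2 p) := by
  induction r1 with
  | nil => simp [pvLook]
  | cons kw r ih =>
    obtain ⟨k, w⟩ := kw
    by_cases h : p = k <;> simp [pvLook, h, ih]

lemma pins_skip (r : List ((Char × Char) × List Char)) :
    ∀ (u : List Char) (prev : Option Char) (rest : List Char), pvNoFire r prev u = true →
      pvPins r prev (u ++ rest) = u ++ pvPins r (pvLastOf prev u) rest := by
  intro u
  induction u with
  | nil => intro prev rest _; simp [pvLastOf]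
  | cons c t ih =>
    intro prev rest h
    simp only [pvNoFire, Bool.and_eq_true, List.isEmpty_iff] at h
    simp only [List.cons_append, pvPins, h.1, List.nil_append, pvLastOf]
    rw [ih _ _ h.2]

-- membership extraction from pvLook
lemma pvLook_mem (r : List ((Char × Char) × List Char)) (p : Char × Char) (w : List Char)
    (h : pvLook r p = some w) : (p, w) ∈ r := by
  induction r with
  | nil => simp [pvLook] at h
  | cons kw rr ih =>
    obtain ⟨k, w'⟩ := kw
    by_cases hp : p = k
    · simp [pvLook, hp] at h; subst hp; subst h; simp
    · simp [pvLook, hp] at h; right; exact ih h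

lemma noFire_of_chainPairs (r : List ((Char × Char) × List Char)) :
    ∀ (u : List Char) (p : Char),
      ((pvChainPairs (p :: u)).all (fun q => (pvLook r q).isNone)) = true →
      pvNoFire r (some p) u = true := by
  intro u
  induction u with
  | nil => intro p _; simp [pvNoFire]
  | cons c t ih =>
    intro p h
    simp only [pvChainPairs, List.all_cons, Bool.and_eq_true, Option.isNone_iff_eq_none] at h
    simp only [pvNoFire, Bool.and_eq_true]
    constructor
    · simp [pvIns, h.1]
    · exact ih c (by simpa using h.2)


lemma chainPairs_mem_append (x : Char) :
    ∀ (u : List Char) (q : Char × Char), q ∈ pvChainPairs u → q ∈ pvChainPairs (u ++ [x]) := by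
  intro u
  induction u with
  | nil => intro q h; simp [pvChainPairs] at h
  | cons a t ih =>
    intro q h
    cases t with
    | nil => simp [pvChainPairs] at h
    | cons b s =>
      simp only [pvChainPairs, List.mem_cons] at h
      rcases h with h | h
      · simp [pvChainPairs, h]
      · simp only [List.cons_append, pvChainPairs]
        exact List.mem_cons_of_mem _ (ih q h)

lemma lastOf_mem_chainPairs :
    ∀ (w : List Char) (p c : Char), w ≠ [] →
      ∃ q, pvLastOf (some p) w = some q ∧ (q, c) ∈ pvChainPairs (p :: w ++ [c]) := by
  intro w
  induction w with
  | nil => intro p c h; exact absurd rfl h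
  | cons v vs ih =>
    intro p c _
    cases vs with
    | nil => exact ⟨v, rfl, by simp [pvChainPairs]⟩
    | cons v2 vs2 =>
      obtain ⟨q, hq, hmem⟩ := ih v c (by simp)
      refine ⟨q, hq, ?_⟩
      simp only [List.cons_append, pvChainPairs]
      exact List.mem_cons_of_mem _ hmem

lemma pins_fuse (r1 r2 : List ((Char × Char) × List Char)) (h : pvCompat r1 r2 = true) :
    ∀ (l : List Char) (prev : Option Char),
      pvPins r2 prev (pvPins r1 prev l) = pvPins (r1 ++ r2) prev l := by
  intro l
  induction l with
  | nil => intro prev; simp [pvPins]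
  | cons c t ih =>
    intro prev
    simp only [pvPins]
    rcases hprev : prev with _ | p
    · -- prev = none : no insertion either side
      simp only [pvIns, List.nil_append, pvPins, pvIns]
      rw [ih (some c)]
    · simp only [pvIns]
      rcases hl : pvLook r1 (p, c) with _ | w
      · -- r1 does not fire
        simp only [Option.getD_none, List.nil_append, pvPins, pvIns, pvLook_append, hl,
          Option.orElse]
        rw [ih (some c)]
      · -- r1 fires with word w
        have hmem : ((p, c), w) ∈ r1 := pvLook_mem _ _ _ hl
        have hc := (List.all_eq_true.mp h) _ hmem
        simp only [Bool.and_eq_true, Bool.not_eq_true'] at hc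
        obtain ⟨hw, hchain⟩ := hc
        -- chain pairs of p :: w ++ [c] are none in r2
        have hchain' : (pvChainPairs (p :: w ++ [c])).all (fun q => (pvLook r2 q).isNone) = true := hchain
        -- split: noFire on w from prev=some p, and last pair (last w, c) none
        simp only [Option.getD_some]
        rw [pins_skip r2 w (some p) _ (by
          apply noFire_of_chainPairs
          rw [List.all_eq_true] at hchain' ⊢
          intro q hq
          exact hchain' q (chainPairs_mem_append c _ q hq))]
        have hlast : pvIns r2 (pvLastOf (some p) w) c = [] := by
          obtain ⟨q, hq, hmem⟩ := lastOf_mem_chainPairs w p c (by simpa using hw)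
          rw [List.all_eq_true] at hchain'
          have := hchain' _ hmem
          simp only [Option.isNone_iff_eq_none] at this
          simp [pvIns, hq, this]
        simp only [pvPins, hlast, List.nil_append]
        rw [ih (some c)]
        simp [pvLook_append, hl, Option.orElse]
lemma ins_single_none (a b : Char) (w : List Char) (prev : Option Char) (c : Char)
    (h : ∀ p, prev = some p → ¬(p = a ∧ c = b)) :
    pvIns [((a, b), w)] prev c = [] := by
  rcases prev with _ | p
  · rfl
  · have hp := h p rfl
    simp only [pvIns, pvLook]
    rw [if_neg (by simpa [Prod.ext_iff] using hp)]
    rfl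

lemma repPair_pins_aux (a b : Char) (w : List Char) (hab : b ≠ a) :
    ∀ (n : Nat) (l : List Char) (prev : Option Char), l.length ≤ n →
      (prev = some a → l.head? ≠ some b) →
      pvPins [((a, b), w)] prev l = repPair a b w l := by
  intro n
  induction n with
  | zero =>
    intro l prev hn _
    have : l = [] := by cases l <;> simp_all
    subst this; simp [pvPins, repPair]
  | succ n ih =>
    intro l prev hn hprev
    match l with
    | [] => simp [pvPins, repPair]
    | [c] =>
      have hins : pvIns [((a, b), w)] prev c = [] := by
        apply ins_single_none
        intro p hp hpc
        exact hprev (by rw [hp, hpc.1]) (by simp [hpc.2])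
      simp [pvPins, hins, repPair]
    | c :: d :: t =>
      by_cases hcd : c = a ∧ d = b
      · have hins : pvIns [((a, b), w)] prev c = [] := by
          apply ins_single_none
          intro p hp hpc
          exact hab (hpc.2.symm.trans hcd.1)
        have hins2 : pvIns [((a, b), w)] (some c) d = w := by
          simp [pvIns, pvLook, hcd.1, hcd.2]
        simp only [pvPins, hins, List.nil_append, hins2]
        rw [ih t (some d) (by simp at hn ⊢; omega)
          (by intro h; rw [Option.some_inj] at h
              exact absurd (hcd.2.symm.trans h) hab)]
        simp [repPair, hcd.1, hcd.2]
      · have hins : pvIns [((a, b), w)] prev c = [] := by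
          apply ins_single_none
          intro p hp hpc
          exact hprev (hp ▸ congrArg some hpc.1) (by simp [hpc.2])
        simp only [pvPins, hins, List.nil_append]
        have : pvIns [((a, b), w)] (some c) d ++ d :: pvPins [((a, b), w)] (some d) t =
            pvPins [((a, b), w)] (some c) (d :: t) := by simp [pvPins]
        rw [this, ih (d :: t) (some c) (by simp at hn ⊢; omega) ?_]
        · simp [repPair, hcd]
        · intro hca
          rw [Option.some_inj] at hca
          subst hca
          by_cases hdb : d = b
          · exact absurd ⟨rfl, hdb⟩ hcd
          · simp [hdb]

lemma repPair_pins (a b : Char) (w : List Char) (hab : b ≠ a)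
    (l : List Char) (prev : Option Char)
    (h : prev = some a → l.head? ≠ some b) :
    pvPins [((a, b), w)] prev l = repPair a b w l :=
  repPair_pins_aux a b w hab l.length l prev (le_refl _) h

-- the 22 fixup rules, in A's application order
def pvRules : List ((Char × Char) × List Char) :=
  [((',', '_'), ['z']), (('[', '_'), ['z']),
   ((',', '0'), ['n','_']), (('[', '0'), ['n','_']),
   ((',', '1'), ['n','_']), (('[', '1'), ['n','_']),
   ((',', '2'), ['n','_']), (('[', '2'), ['n','_']),
   ((',', '3'), ['n','_']), (('[', '3'), ['n','_']),
   ((',', '4'), ['n','_']), (('[', '4'), ['n','_']),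
   ((',', '5'), ['n','_']), (('[', '5'), ['n','_']),
   ((',', '6'), ['n','_']), (('[', '6'), ['n','_']),
   ((',', '7'), ['n','_']), (('[', '7'), ['n','_']),
   ((',', '8'), ['n','_']), (('[', '8'), ['n','_']),
   ((',', '9'), ['n','_']), (('[', '9'), ['n','_'])]

def pvFlagOf : Option Char → Bool
  | some p => p = ',' || p = '['
  | none => false

lemma insZ (prev : Option Char) : pvIns pvRules prev '_' = if pvFlagOf prev then ['z'] else [] := by
  rcases prev with _ | p
  · rfl
  · by_cases h1 : p = ','
    · subst h1; decide
    · by_cases h2 : p = '['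
      · subst h2; decide
      · simp [pvIns, pvLook, pvRules, pvFlagOf, Prod.ext_iff, h1, h2]

lemma insDigit (prev : Option Char) (d : Char) (h1 : '0' ≤ d) (h2 : d ≤ '9') :
    pvIns pvRules prev d = if pvFlagOf prev then ['n', '_'] else [] := by
  rcases prev with _ | p
  · rfl
  · rcases digit_cases d h1 h2 with h|h|h|h|h|h|h|h|h|h <;> subst h <;>
      (by_cases hp1 : p = ','
       · subst hp1; decide
       · by_cases hp2 : p = '['
         · subst hp2; decide
         · simp [pvIns, pvLook, pvRules, pvFlagOf, Prod.ext_iff, hp1, hp2])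

lemma insOther (prev : Option Char) (d : Char) (hu : d ≠ '_') (hd : ¬('0' ≤ d ∧ d ≤ '9')) :
    pvIns pvRules prev d = [] := by
  rcases prev with _ | p
  · rfl
  · have h0 : d ≠ '0' := by rintro rfl; exact hd (by decide)
    have h1 : d ≠ '1' := by rintro rfl; exact hd (by decide)
    have h2 : d ≠ '2' := by rintro rfl; exact hd (by decide)
    have h3 : d ≠ '3' := by rintro rfl; exact hd (by decide)
    have h4 : d ≠ '4' := by rintro rfl; exact hd (by decide)
    have h5 : d ≠ '5' := by rintro rfl; exact hd (by decide)
    have h6 : d ≠ '6' := by rintro rfl; exact hd (by decide)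
    have h7 : d ≠ '7' := by rintro rfl; exact hd (by decide)
    have h8 : d ≠ '8' := by rintro rfl; exact hd (by decide)
    have h9 : d ≠ '9' := by rintro rfl; exact hd (by decide)
    simp [pvIns, pvLook, pvRules, Prod.ext_iff, hu, h0, h1, h2, h3, h4, h5, h6, h7, h8, h9]

lemma pins_goB : ∀ (l : List Char) (prev : Option Char),
    pvPins pvRules prev (l.flatMap (fun c => pvMapB (PySem.Chars.lowerChar c))) =
      pvGoB (pvFlagOf prev) l := by
  intro l
  induction l with
  | nil => intro prev; simp [pvPins, pvGoB]
  | cons c t ih =>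
    intro prev
    rw [List.flatMap_cons]
    generalize he : PySem.Chars.lowerChar c = e
    by_cases h0 : e = '{'
    · subst h0
      rw [show pvMapB '{' = ['['] from by decide]
      simp only [List.cons_append, List.nil_append, pvPins]
      rw [insOther prev '[' (by decide) (by decide), ih (some '[')]
      simp [pvGoB, he, pvPreB, pvMapB, pvFlagOf]
    by_cases h1 : e = '}'
    · subst h1
      rw [show pvMapB '}' = [']'] from by decide]
      simp only [List.cons_append, List.nil_append, pvPins]
      rw [insOther prev ']' (by decide) (by decide), ih (some ']')]
      simp [pvGoB, he, pvPreB, pvMapB, pvFlagOf]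
    by_cases h2 : e = '-'
    · subst h2
      rw [show pvMapB '-' = ['_'] from by decide]
      simp only [List.cons_append, List.nil_append, pvPins]
      rw [insZ prev, ih (some '_')]
      simp [pvGoB, he, pvPreB, pvMapB, pvFlagOf]
    by_cases h3 : e = '.'
    · subst h3
      rw [show pvMapB '.' = ['_','d','o','t','_'] from by decide]
      rw [show (['_','d','o','t','_'] : List Char) ++ List.flatMap (fun c => pvMapB (PySem.Chars.lowerChar c)) t = '_' :: (['d','o','t','_'] ++ List.flatMap (fun c => pvMapB (PySem.Chars.lowerChar c)) t) from by simp]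
      simp only [pvPins]
      rw [pins_skip pvRules ['d','o','t','_'] (some '_') _ (by decide)]
      rw [show pvLastOf (some '_') ['d','o','t','_'] = some '_' from by decide]
      rw [insZ prev, ih (some '_')]
      simp [pvGoB, he, pvPreB, pvMapB, pvFlagOf]
    by_cases h4 : e = ':'
    · subst h4
      rw [show pvMapB ':' = ['_','c','o','l','o','n','_'] from by decide]
      rw [show (['_','c','o','l','o','n','_'] : List Char) ++ List.flatMap (fun c => pvMapB (PySem.Chars.lowerChar c)) t = '_' :: (['c','o','l','o','n','_'] ++ List.flatMap (fun c => pvMapB (PySem.Chars.lowerChar c)) t) from by simp]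
      simp only [pvPins]
      rw [pins_skip pvRules ['c','o','l','o','n','_'] (some '_') _ (by decide)]
      rw [show pvLastOf (some '_') ['c','o','l','o','n','_'] = some '_' from by decide]
      rw [insZ prev, ih (some '_')]
      simp [pvGoB, he, pvPreB, pvMapB, pvFlagOf]
    by_cases h5 : e = '='
    · subst h5
      rw [show pvMapB '=' = ['_','e','q','_'] from by decide]
      rw [show (['_','e','q','_'] : List Char) ++ List.flatMap (fun c => pvMapB (PySem.Chars.lowerChar c)) t = '_' :: (['e','q','_'] ++ List.flatMap (fun c => pvMapB (PySem.Chars.lowerChar c)) t) from by simp]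
      simp only [pvPins]
      rw [pins_skip pvRules ['e','q','_'] (some '_') _ (by decide)]
      rw [show pvLastOf (some '_') ['e','q','_'] = some '_' from by decide]
      rw [insZ prev, ih (some '_')]
      simp [pvGoB, he, pvPreB, pvMapB, pvFlagOf]
    by_cases h6 : e = '\''
    · subst h6
      rw [show pvMapB '\'' = ['_','a','p','o','s','t','r','_'] from by decide]
      rw [show (['_','a','p','o','s','t','r','_'] : List Char) ++ List.flatMap (fun c => pvMapB (PySem.Chars.lowerChar c)) t = '_' :: (['a','p','o','s','t','r','_'] ++ List.flatMap (fun c => pvMapB (PySem.Chars.lowerChar c)) t) from by simp]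
      simp only [pvPins]
      rw [pins_skip pvRules ['a','p','o','s','t','r','_'] (some '_') _ (by decide)]
      rw [show pvLastOf (some '_') ['a','p','o','s','t','r','_'] = some '_' from by decide]
      rw [insZ prev, ih (some '_')]
      simp [pvGoB, he, pvPreB, pvMapB, pvFlagOf]
    by_cases h7 : e = '@'
    · subst h7
      rw [show pvMapB '@' = ['_','a','t','_'] from by decide]
      rw [show (['_','a','t','_'] : List Char) ++ List.flatMap (fun c => pvMapB (PySem.Chars.lowerChar c)) t = '_' :: (['a','t','_'] ++ List.flatMap (fun c => pvMapB (PySem.Chars.lowerChar c)) t) from by simp]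
      simp only [pvPins]
      rw [pins_skip pvRules ['a','t','_'] (some '_') _ (by decide)]
      rw [show pvLastOf (some '_') ['a','t','_'] = some '_' from by decide]
      rw [insZ prev, ih (some '_')]
      simp [pvGoB, he, pvPreB, pvMapB, pvFlagOf]
    by_cases h8 : e = '#'
    · subst h8
      rw [show pvMapB '#' = ['_','s','h','a','r','p','_'] from by decide]
      rw [show (['_','s','h','a','r','p','_'] : List Char) ++ List.flatMap (fun c => pvMapB (PySem.Chars.lowerChar c)) t = '_' :: (['s','h','a','r','p','_'] ++ List.flatMap (fun c => pvMapB (PySem.Chars.lowerChar c)) t) from by simp]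
      simp only [pvPins]
      rw [pins_skip pvRules ['s','h','a','r','p','_'] (some '_') _ (by decide)]
      rw [show pvLastOf (some '_') ['s','h','a','r','p','_'] = some '_' from by decide]
      rw [insZ prev, ih (some '_')]
      simp [pvGoB, he, pvPreB, pvMapB, pvFlagOf]
    by_cases h9 : e = '/'
    · subst h9
      rw [show pvMapB '/' = ['_','s','l','a','s','h','_'] from by decide]
      rw [show (['_','s','l','a','s','h','_'] : List Char) ++ List.flatMap (fun c => pvMapB (PySem.Chars.lowerChar c)) t = '_' :: (['s','l','a','s','h','_'] ++ List.flatMap (fun c => pvMapB (PySem.Chars.lowerChar c)) t) from by simp]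
      simp only [pvPins]
      rw [pins_skip pvRules ['s','l','a','s','h','_'] (some '_') _ (by decide)]
      rw [show pvLastOf (some '_') ['s','l','a','s','h','_'] = some '_' from by decide]
      rw [insZ prev, ih (some '_')]
      simp [pvGoB, he, pvPreB, pvMapB, pvFlagOf]
    by_cases h10 : e = '\\'
    · subst h10
      rw [show pvMapB '\\' = ['_','b','c','k','s','l','a','s','h','_'] from by decide]
      rw [show (['_','b','c','k','s','l','a','s','h','_'] : List Char) ++ List.flatMap (fun c => pvMapB (PySem.Chars.lowerChar c)) t = '_' :: (['b','c','k','s','l','a','s','h','_'] ++ List.flatMap (fun c => pvMapB (PySem.Chars.lowerChar c)) t) from by simp]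
      simp only [pvPins]
      rw [pins_skip pvRules ['b','c','k','s','l','a','s','h','_'] (some '_') _ (by decide)]
      rw [show pvLastOf (some '_') ['b','c','k','s','l','a','s','h','_'] = some '_' from by decide]
      rw [insZ prev, ih (some '_')]
      simp [pvGoB, he, pvPreB, pvMapB, pvFlagOf]
    · -- unmapped character: chunk is [e]
      rw [show pvMapB e = [e] from by
        simp [pvMapB, h0, h1, h2, h3, h4, h5, h6, h7, h8, h9, h10]]
      simp only [List.cons_append, List.nil_append, pvPins]
      rw [ih (some e)]
      by_cases hz : e = '_'
      · subst hz
        rw [insZ prev]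
        simp [pvGoB, he, pvPreB, pvMapB, pvFlagOf]
      · by_cases hdig : '0' ≤ e ∧ e ≤ '9'
        · rw [insDigit prev e hdig.1 hdig.2]
          have hnc : e ≠ ',' := by rintro rfl; exact absurd hdig (by decide)
          have hnb : e ≠ '[' := by rintro rfl; exact absurd hdig (by decide)
          simp [pvGoB, he, pvPreB, pvMapB, pvFlagOf, h0, h1, h2, h3, h4, h5, h6, h7, h8, h9, h10, hz, hdig, hnc, hnb]
        · rw [insOther prev e hz hdig]
          simp [pvGoB, he, pvPreB, pvMapB, pvFlagOf, h0, h1, h2, h3, h4, h5, h6, h7, h8, h9, h10, hz, hdig]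
lemma none_cond (l : List Char) (a b : Char) : (none : Option Char) = some a → l.head? ≠ some b := by
  intro h; simp at h

set_option maxHeartbeats 4000000 in
theorem adaptGuarantees2PrologSyntax_spec : Claim_equal_adaptGuarantees2PrologSyntax := by
  intro s _hdom
  unfold Spec_adaptGuarantees2PrologSyntax adaptGuarantees2PrologSyntax adaptGuarantees2PrologSyntax_alt
  rw [← String.toList_inj]
  simp only [pvReplacementsA, List.foldl]
  rw [show "0123456789".toList = ['0','1','2','3','4','5','6','7','8','9'] from by decide]
  simp only [List.foldl]
  simp only [PySem.Str.toList_replace, PySem.Str.toList_lower]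
  simp only [show "{".toList = (['{'] : List Char) from by decide,
    show "[".toList = (['['] : List Char) from by decide,
    show "}".toList = (['}'] : List Char) from by decide,
    show "]".toList = ([']'] : List Char) from by decide,
    show "-".toList = (['-'] : List Char) from by decide,
    show "_".toList = (['_'] : List Char) from by decide,
    show ".".toList = (['.'] : List Char) from by decide,
    show "_dot_".toList = (['_','d','o','t','_'] : List Char) from by decide,
    show ":".toList = ([':'] : List Char) from by decide,
    show "_colon_".toList = (['_','c','o','l','o','n','_'] : List Char) from by decide,
    show "=".toList = (['='] : List Char) from by decide,
    show "_eq_".toList = (['_','e','q','_'] : List Char) from by decide,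
    show "'".toList = (['\''] : List Char) from by decide,
    show "_apostr_".toList = (['_','a','p','o','s','t','r','_'] : List Char) from by decide,
    show "@".toList = (['@'] : List Char) from by decide,
    show "_at_".toList = (['_','a','t','_'] : List Char) from by decide,
    show "#".toList = (['#'] : List Char) from by decide,
    show "_sharp_".toList = (['_','s','h','a','r','p','_'] : List Char) from by decide,
    show "/".toList = (['/'] : List Char) from by decide,
    show "_slash_".toList = (['_','s','l','a','s','h','_'] : List Char) from by decide,
    show "\\".toList = (['\\'] : List Char) from by decide,
    show "_bckslash_".toList = (['_','b','c','k','s','l','a','s','h','_'] : List Char) from by decide,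
    show ",_".toList = ([',','_'] : List Char) from by decide,
    show ",z_".toList = ([',','z','_'] : List Char) from by decide,
    show "[_".toList = (['[','_'] : List Char) from by decide,
    show "[z_".toList = (['[','z','_'] : List Char) from by decide,
    show ("," ++ String.ofList ['0']).toList = ([',','0'] : List Char) from by decide,
    show (",n_" ++ String.ofList ['0']).toList = ([',','n','_','0'] : List Char) from by decide,
    show ("[" ++ String.ofList ['0']).toList = (['[','0'] : List Char) from by decide,
    show ("[n_" ++ String.ofList ['0']).toList = (['[','n','_','0'] : List Char) from by decide,
    show ("," ++ String.ofList ['1']).toList = ([',','1'] : List Char) from by decide,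
    show (",n_" ++ String.ofList ['1']).toList = ([',','n','_','1'] : List Char) from by decide,
    show ("[" ++ String.ofList ['1']).toList = (['[','1'] : List Char) from by decide,
    show ("[n_" ++ String.ofList ['1']).toList = (['[','n','_','1'] : List Char) from by decide,
    show ("," ++ String.ofList ['2']).toList = ([',','2'] : List Char) from by decide,
    show (",n_" ++ String.ofList ['2']).toList = ([',','n','_','2'] : List Char) from by decide,
    show ("[" ++ String.ofList ['2']).toList = (['[','2'] : List Char) from by decide,
    show ("[n_" ++ String.ofList ['2']).toList = (['[','n','_','2'] : List Char) from by decide,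
    show ("," ++ String.ofList ['3']).toList = ([',','3'] : List Char) from by decide,
    show (",n_" ++ String.ofList ['3']).toList = ([',','n','_','3'] : List Char) from by decide,
    show ("[" ++ String.ofList ['3']).toList = (['[','3'] : List Char) from by decide,
    show ("[n_" ++ String.ofList ['3']).toList = (['[','n','_','3'] : List Char) from by decide,
    show ("," ++ String.ofList ['4']).toList = ([',','4'] : List Char) from by decide,
    show (",n_" ++ String.ofList ['4']).toList = ([',','n','_','4'] : List Char) from by decide,
    show ("[" ++ String.ofList ['4']).toList = (['[','4'] : List Char) from by decide,
    show ("[n_" ++ String.ofList ['4']).toList = (['[','n','_','4'] : List Char) from by decide,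
    show ("," ++ String.ofList ['5']).toList = ([',','5'] : List Char) from by decide,
    show (",n_" ++ String.ofList ['5']).toList = ([',','n','_','5'] : List Char) from by decide,
    show ("[" ++ String.ofList ['5']).toList = (['[','5'] : List Char) from by decide,
    show ("[n_" ++ String.ofList ['5']).toList = (['[','n','_','5'] : List Char) from by decide,
    show ("," ++ String.ofList ['6']).toList = ([',','6'] : List Char) from by decide,
    show (",n_" ++ String.ofList ['6']).toList = ([',','n','_','6'] : List Char) from by decide,
    show ("[" ++ String.ofList ['6']).toList = (['[','6'] : List Char) from by decide,
    show ("[n_" ++ String.ofList ['6']).toList = (['[','n','_','6'] : List Char) from by decide,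
    show ("," ++ String.ofList ['7']).toList = ([',','7'] : List Char) from by decide,
    show (",n_" ++ String.ofList ['7']).toList = ([',','n','_','7'] : List Char) from by decide,
    show ("[" ++ String.ofList ['7']).toList = (['[','7'] : List Char) from by decide,
    show ("[n_" ++ String.ofList ['7']).toList = (['[','n','_','7'] : List Char) from by decide,
    show ("," ++ String.ofList ['8']).toList = ([',','8'] : List Char) from by decide,
    show (",n_" ++ String.ofList ['8']).toList = ([',','n','_','8'] : List Char) from by decide,
    show ("[" ++ String.ofList ['8']).toList = (['[','8'] : List Char) from by decide,
    show ("[n_" ++ String.ofList ['8']).toList = (['[','n','_','8'] : List Char) from by decide,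
    show ("," ++ String.ofList ['9']).toList = ([',','9'] : List Char) from by decide,
    show (",n_" ++ String.ofList ['9']).toList = ([',','n','_','9'] : List Char) from by decide,
    show ("[" ++ String.ofList ['9']).toList = (['[','9'] : List Char) from by decide,
    show ("[n_" ++ String.ofList ['9']).toList = (['[','n','_','9'] : List Char) from by decide]
  simp only [show ([',','z','_'] : List Char) = ',' :: ['z'] ++ ['_'] from rfl,
    show (['[','z','_'] : List Char) = '[' :: ['z'] ++ ['_'] from rfl,
    show (([',','n','_','0']) : List Char) = ',' :: ['n','_'] ++ ['0'] from rfl,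
    show ((['[','n','_','0']) : List Char) = '[' :: ['n','_'] ++ ['0'] from rfl,
    show (([',','n','_','1']) : List Char) = ',' :: ['n','_'] ++ ['1'] from rfl,
    show ((['[','n','_','1']) : List Char) = '[' :: ['n','_'] ++ ['1'] from rfl,
    show (([',','n','_','2']) : List Char) = ',' :: ['n','_'] ++ ['2'] from rfl,
    show ((['[','n','_','2']) : List Char) = '[' :: ['n','_'] ++ ['2'] from rfl,
    show (([',','n','_','3']) : List Char) = ',' :: ['n','_'] ++ ['3'] from rfl,
    show ((['[','n','_','3']) : List Char) = '[' :: ['n','_'] ++ ['3'] from rfl,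
    show (([',','n','_','4']) : List Char) = ',' :: ['n','_'] ++ ['4'] from rfl,
    show ((['[','n','_','4']) : List Char) = '[' :: ['n','_'] ++ ['4'] from rfl,
    show (([',','n','_','5']) : List Char) = ',' :: ['n','_'] ++ ['5'] from rfl,
    show ((['[','n','_','5']) : List Char) = '[' :: ['n','_'] ++ ['5'] from rfl,
    show (([',','n','_','6']) : List Char) = ',' :: ['n','_'] ++ ['6'] from rfl,
    show ((['[','n','_','6']) : List Char) = '[' :: ['n','_'] ++ ['6'] from rfl,
    show (([',','n','_','7']) : List Char) = ',' :: ['n','_'] ++ ['7'] from rfl,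
    show ((['[','n','_','7']) : List Char) = '[' :: ['n','_'] ++ ['7'] from rfl,
    show (([',','n','_','8']) : List Char) = ',' :: ['n','_'] ++ ['8'] from rfl,
    show ((['[','n','_','8']) : List Char) = '[' :: ['n','_'] ++ ['8'] from rfl,
    show (([',','n','_','9']) : List Char) = ',' :: ['n','_'] ++ ['9'] from rfl,
    show ((['[','n','_','9']) : List Char) = '[' :: ['n','_'] ++ ['9'] from rfl]
  simp only [replace_single '{' ['['], replace_single '}' [']'], replace_single '-' ['_'], replace_single '.' ['_','d','o','t','_'], replace_single ':' ['_','c','o','l','o','n','_'], replace_single '=' ['_','e','q','_'], replace_single '\'' ['_','a','p','o','s','t','r','_'], replace_single '@' ['_','a','t','_'], replace_single '#' ['_','s','h','a','r','p','_'], replace_single '/' ['_','s','l','a','s','h','_'], replace_single '\\' ['_','b','c','k','s','l','a','s','h','_']]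
  simp only [replace_pair ',' '_' ['z'], replace_pair '[' '_' ['z'], replace_pair ',' '0' ['n','_'], replace_pair '[' '0' ['n','_'], replace_pair ',' '1' ['n','_'], replace_pair '[' '1' ['n','_'], replace_pair ',' '2' ['n','_'], replace_pair '[' '2' ['n','_'], replace_pair ',' '3' ['n','_'], replace_pair '[' '3' ['n','_'], replace_pair ',' '4' ['n','_'], replace_pair '[' '4' ['n','_'], replace_pair ',' '5' ['n','_'], replace_pair '[' '5' ['n','_'], replace_pair ',' '6' ['n','_'], replace_pair '[' '6' ['n','_'], replace_pair ',' '7' ['n','_'], replace_pair '[' '7' ['n','_'], replace_pair ',' '8' ['n','_'], replace_pair '[' '8' ['n','_'], replace_pair ',' '9' ['n','_'], replace_pair '[' '9' ['n','_']]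
  rw [String.toList_ofList]
  rw [show PySem.Chars.lower s.toList = List.map PySem.Chars.lowerChar s.toList from rfl]
  rw [stage_map]
  have key : ∀ m : List Char,
      (repPair '[' '9' ['n','_'] (repPair ',' '9' ['n','_'] (repPair '[' '8' ['n','_'] (repPair ',' '8' ['n','_']
        (repPair '[' '7' ['n','_'] (repPair ',' '7' ['n','_'] (repPair '[' '6' ['n','_'] (repPair ',' '6' ['n','_']
        (repPair '[' '5' ['n','_'] (repPair ',' '5' ['n','_'] (repPair '[' '4' ['n','_'] (repPair ',' '4' ['n','_']
        (repPair '[' '3' ['n','_'] (repPair ',' '3' ['n','_'] (repPair '[' '2' ['n','_'] (repPair ',' '2' ['n','_']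
        (repPair '[' '1' ['n','_'] (repPair ',' '1' ['n','_'] (repPair '[' '0' ['n','_'] (repPair ',' '0' ['n','_']
        (repPair '[' '_' ['z'] (repPair ',' '_' ['z'] m)))))))))))))))))))))) = pvPins pvRules none m := by
    intro m
    rw [← repPair_pins ',' '_' ['z'] (by decide) m none (none_cond _ _ _)]
    rw [← repPair_pins '[' '_' ['z'] (by decide) (pvPins [((',', '_'), ['z'])] none m) none (none_cond _ _ _)]
    rw [pins_fuse ([((',', '_'), ['z'])]) ([(('[', '_'), ['z'])]) (by decide)]
    rw [← repPair_pins ',' '0' ['n','_'] (by decide) (pvPins ([((',', '_'), ['z'])] ++ [(('[', '_'), ['z'])]) none m) none (none_cond _ _ _)]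
    rw [pins_fuse (([((',', '_'), ['z'])] ++ [(('[', '_'), ['z'])])) ([((',', '0'), ['n','_'])]) (by decide)]
    rw [← repPair_pins '[' '0' ['n','_'] (by decide) (pvPins (([((',', '_'), ['z'])] ++ [(('[', '_'), ['z'])]) ++ [((',', '0'), ['n','_'])]) none m) none (none_cond _ _ _)]
    rw [pins_fuse ((([((',', '_'), ['z'])] ++ [(('[', '_'), ['z'])]) ++ [((',', '0'), ['n','_'])])) ([(('[', '0'), ['n','_'])]) (by decide)]
    rw [← repPair_pins ',' '1' ['n','_'] (by decide) (pvPins ((([((',', '_'), ['z'])] ++ [(('[', '_'), ['z'])]) ++ [((',', '0'), ['n','_'])]) ++ [(('[', '0'), ['n','_'])]) none m) none (none_cond _ _ _)]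
    rw [pins_fuse (((([((',', '_'), ['z'])] ++ [(('[', '_'), ['z'])]) ++ [((',', '0'), ['n','_'])]) ++ [(('[', '0'), ['n','_'])])) ([((',', '1'), ['n','_'])]) (by decide)]
    rw [← repPair_pins '[' '1' ['n','_'] (by decide) (pvPins (((([((',', '_'), ['z'])] ++ [(('[', '_'), ['z'])]) ++ [((',', '0'), ['n','_'])]) ++ [(('[', '0'), ['n','_'])]) ++ [((',', '1'), ['n','_'])]) none m) none (none_cond _ _ _)]
    rw [pins_fuse ((((([((',', '_'), ['z'])] ++ [(('[', '_'), ['z'])]) ++ [((',', '0'), ['n','_'])]) ++ [(('[', '0'), ['n','_'])]) ++ [((',', '1'), ['n','_'])])) ([(('[', '1'), ['n','_'])]) (by decide)]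
    rw [← repPair_pins ',' '2' ['n','_'] (by decide) (pvPins ((((([((',', '_'), ['z'])] ++ [(('[', '_'), ['z'])]) ++ [((',', '0'), ['n','_'])]) ++ [(('[', '0'), ['n','_'])]) ++ [((',', '1'), ['n','_'])]) ++ [(('[', '1'), ['n','_'])]) none m) none (none_cond _ _ _)]
    rw [pins_fuse (((((([((',', '_'), ['z'])] ++ [(('[', '_'), ['z'])]) ++ [((',', '0'), ['n','_'])]) ++ [(('[', '0'), ['n','_'])]) ++ [((',', '1'), ['n','_'])]) ++ [(('[', '1'), ['n','_'])])) ([((',', '2'), ['n','_'])]) (by decide)]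
    rw [← repPair_pins '[' '2' ['n','_'] (by decide) (pvPins (((((([((',', '_'), ['z'])] ++ [(('[', '_'), ['z'])]) ++ [((',', '0'), ['n','_'])]) ++ [(('[', '0'), ['n','_'])]) ++ [((',', '1'), ['n','_'])]) ++ [(('[', '1'), ['n','_'])]) ++ [((',', '2'), ['n','_'])]) none m) none (none_cond _ _ _)]
    rw [pins_fuse ((((((([((',', '_'), ['z'])] ++ [(('[', '_'), ['z'])]) ++ [((',', '0'), ['n','_'])]) ++ [(('[', '0'), ['n','_'])]) ++ [((',', '1'), ['n','_'])]) ++ [(('[', '1'), ['n','_'])]) ++ [((',', '2'), ['n','_'])])) ([(('[', '2'), ['n','_'])]) (by decide)]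
    rw [← repPair_pins ',' '3' ['n','_'] (by decide) (pvPins ((((((([((',', '_'), ['z'])] ++ [(('[', '_'), ['z'])]) ++ [((',', '0'), ['n','_'])]) ++ [(('[', '0'), ['n','_'])]) ++ [((',', '1'), ['n','_'])]) ++ [(('[', '1'), ['n','_'])]) ++ [((',', '2'), ['n','_'])]) ++ [(('[', '2'), ['n','_'])]) none m) none (none_cond _ _ _)]
    rw [pins_fuse (((((((([((',', '_'), ['z'])] ++ [(('[', '_'), ['z'])]) ++ [((',', '0'), ['n','_'])]) ++ [(('[', '0'), ['n','_'])]) ++ [((',', '1'), ['n','_'])]) ++ [(('[', '1'), ['n','_'])]) ++ [((',', '2'), ['n','_'])]) ++ [(('[', '2'), ['n','_'])])) ([((',', '3'), ['n','_'])]) (by decide)]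
    rw [← repPair_pins '[' '3' ['n','_'] (by decide) (pvPins (((((((([((',', '_'), ['z'])] ++ [(('[', '_'), ['z'])]) ++ [((',', '0'), ['n','_'])]) ++ [(('[', '0'), ['n','_'])]) ++ [((',', '1'), ['n','_'])]) ++ [(('[', '1'), ['n','_'])]) ++ [((',', '2'), ['n','_'])]) ++ [(('[', '2'), ['n','_'])]) ++ [((',', '3'), ['n','_'])]) none m) none (none_cond _ _ _)]
    rw [pins_fuse ((((((((([((',', '_'), ['z'])] ++ [(('[', '_'), ['z'])]) ++ [((',', '0'), ['n','_'])]) ++ [(('[', '0'), ['n','_'])]) ++ [((',', '1'), ['n','_'])]) ++ [(('[', '1'), ['n','_'])]) ++ [((',', '2'), ['n','_'])]) ++ [(('[', '2'), ['n','_'])]) ++ [((',', '3'), ['n','_'])])) ([(('[', '3'), ['n','_'])]) (by decide)]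
    rw [← repPair_pins ',' '4' ['n','_'] (by decide) (pvPins ((((((((([((',', '_'), ['z'])] ++ [(('[', '_'), ['z'])]) ++ [((',', '0'), ['n','_'])]) ++ [(('[', '0'), ['n','_'])]) ++ [((',', '1'), ['n','_'])]) ++ [(('[', '1'), ['n','_'])]) ++ [((',', '2'), ['n','_'])]) ++ [(('[', '2'), ['n','_'])]) ++ [((',', '3'), ['n','_'])]) ++ [(('[', '3'), ['n','_'])]) none m) none (none_cond _ _ _)]
    rw [pins_fuse (((((((((([((',', '_'), ['z'])] ++ [(('[', '_'), ['z'])]) ++ [((',', '0'), ['n','_'])]) ++ [(('[', '0'), ['n','_'])]) ++ [((',', '1'), ['n','_'])]) ++ [(('[', '1'), ['n','_'])]) ++ [((',', '2'), ['n','_'])]) ++ [(('[', '2'), ['n','_'])]) ++ [((',', '3'), ['n','_'])]) ++ [(('[', '3'), ['n','_'])])) ([((',', '4'), ['n','_'])]) (by decide)]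
    rw [← repPair_pins '[' '4' ['n','_'] (by decide) (pvPins (((((((((([((',', '_'), ['z'])] ++ [(('[', '_'), ['z'])]) ++ [((',', '0'), ['n','_'])]) ++ [(('[', '0'), ['n','_'])]) ++ [((',', '1'), ['n','_'])]) ++ [(('[', '1'), ['n','_'])]) ++ [((',', '2'), ['n','_'])]) ++ [(('[', '2'), ['n','_'])]) ++ [((',', '3'), ['n','_'])]) ++ [(('[', '3'), ['n','_'])]) ++ [((',', '4'), ['n','_'])]) none m) none (none_cond _ _ _)]
    rw [pins_fuse ((((((((((([((',', '_'), ['z'])] ++ [(('[', '_'), ['z'])]) ++ [((',', '0'), ['n','_'])]) ++ [(('[', '0'), ['n','_'])]) ++ [((',', '1'), ['n','_'])]) ++ [(('[', '1'), ['n','_'])]) ++ [((',', '2'), ['n','_'])]) ++ [(('[', '2'), ['n','_'])]) ++ [((',', '3'), ['n','_'])]) ++ [(('[', '3'), ['n','_'])]) ++ [((',', '4'), ['n','_'])])) ([(('[', '4'), ['n','_'])]) (by decide)]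
    rw [← repPair_pins ',' '5' ['n','_'] (by decide) (pvPins ((((((((((([((',', '_'), ['z'])] ++ [(('[', '_'), ['z'])]) ++ [((',', '0'), ['n','_'])]) ++ [(('[', '0'), ['n','_'])]) ++ [((',', '1'), ['n','_'])]) ++ [(('[', '1'), ['n','_'])]) ++ [((',', '2'), ['n','_'])]) ++ [(('[', '2'), ['n','_'])]) ++ [((',', '3'), ['n','_'])]) ++ [(('[', '3'), ['n','_'])]) ++ [((',', '4'), ['n','_'])]) ++ [(('[', '4'), ['n','_'])]) none m) none (none_cond _ _ _)]
    rw [pins_fuse (((((((((((([((',', '_'), ['z'])] ++ [(('[', '_'), ['z'])]) ++ [((',', '0'), ['n','_'])]) ++ [(('[', '0'), ['n','_'])]) ++ [((',', '1'), ['n','_'])]) ++ [(('[', '1'), ['n','_'])]) ++ [((',', '2'), ['n','_'])]) ++ [(('[', '2'), ['n','_'])]) ++ [((',', '3'), ['n','_'])]) ++ [(('[', '3'), ['n','_'])]) ++ [((',', '4'), ['n','_'])]) ++ [(('[', '4'), ['n','_'])])) ([((',', '5'), ['n','_'])]) (by decide)]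
    rw [← repPair_pins '[' '5' ['n','_'] (by decide) (pvPins (((((((((((([((',', '_'), ['z'])] ++ [(('[', '_'), ['z'])]) ++ [((',', '0'), ['n','_'])]) ++ [(('[', '0'), ['n','_'])]) ++ [((',', '1'), ['n','_'])]) ++ [(('[', '1'), ['n','_'])]) ++ [((',', '2'), ['n','_'])]) ++ [(('[', '2'), ['n','_'])]) ++ [((',', '3'), ['n','_'])]) ++ [(('[', '3'), ['n','_'])]) ++ [((',', '4'), ['n','_'])]) ++ [(('[', '4'), ['n','_'])]) ++ [((',', '5'), ['n','_'])]) none m) none (none_cond _ _ _)]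
    rw [pins_fuse ((((((((((((([((',', '_'), ['z'])] ++ [(('[', '_'), ['z'])]) ++ [((',', '0'), ['n','_'])]) ++ [(('[', '0'), ['n','_'])]) ++ [((',', '1'), ['n','_'])]) ++ [(('[', '1'), ['n','_'])]) ++ [((',', '2'), ['n','_'])]) ++ [(('[', '2'), ['n','_'])]) ++ [((',', '3'), ['n','_'])]) ++ [(('[', '3'), ['n','_'])]) ++ [((',', '4'), ['n','_'])]) ++ [(('[', '4'), ['n','_'])]) ++ [((',', '5'), ['n','_'])])) ([(('[', '5'), ['n','_'])]) (by decide)]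
    rw [← repPair_pins ',' '6' ['n','_'] (by decide) (pvPins ((((((((((((([((',', '_'), ['z'])] ++ [(('[', '_'), ['z'])]) ++ [((',', '0'), ['n','_'])]) ++ [(('[', '0'), ['n','_'])]) ++ [((',', '1'), ['n','_'])]) ++ [(('[', '1'), ['n','_'])]) ++ [((',', '2'), ['n','_'])]) ++ [(('[', '2'), ['n','_'])]) ++ [((',', '3'), ['n','_'])]) ++ [(('[', '3'), ['n','_'])]) ++ [((',', '4'), ['n','_'])]) ++ [(('[', '4'), ['n','_'])]) ++ [((',', '5'), ['n','_'])]) ++ [(('[', '5'), ['n','_'])]) none m) none (none_cond _ _ _)]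
    rw [pins_fuse (((((((((((((([((',', '_'), ['z'])] ++ [(('[', '_'), ['z'])]) ++ [((',', '0'), ['n','_'])]) ++ [(('[', '0'), ['n','_'])]) ++ [((',', '1'), ['n','_'])]) ++ [(('[', '1'), ['n','_'])]) ++ [((',', '2'), ['n','_'])]) ++ [(('[', '2'), ['n','_'])]) ++ [((',', '3'), ['n','_'])]) ++ [(('[', '3'), ['n','_'])]) ++ [((',', '4'), ['n','_'])]) ++ [(('[', '4'), ['n','_'])]) ++ [((',', '5'), ['n','_'])]) ++ [(('[', '5'), ['n','_'])])) ([((',', '6'), ['n','_'])]) (by decide)]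
    rw [← repPair_pins '[' '6' ['n','_'] (by decide) (pvPins (((((((((((((([((',', '_'), ['z'])] ++ [(('[', '_'), ['z'])]) ++ [((',', '0'), ['n','_'])]) ++ [(('[', '0'), ['n','_'])]) ++ [((',', '1'), ['n','_'])]) ++ [(('[', '1'), ['n','_'])]) ++ [((',', '2'), ['n','_'])]) ++ [(('[', '2'), ['n','_'])]) ++ [((',', '3'), ['n','_'])]) ++ [(('[', '3'), ['n','_'])]) ++ [((',', '4'), ['n','_'])]) ++ [(('[', '4'), ['n','_'])]) ++ [((',', '5'), ['n','_'])]) ++ [(('[', '5'), ['n','_'])]) ++ [((',', '6'), ['n','_'])]) none m) none (none_cond _ _ _)]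
    rw [pins_fuse ((((((((((((((([((',', '_'), ['z'])] ++ [(('[', '_'), ['z'])]) ++ [((',', '0'), ['n','_'])]) ++ [(('[', '0'), ['n','_'])]) ++ [((',', '1'), ['n','_'])]) ++ [(('[', '1'), ['n','_'])]) ++ [((',', '2'), ['n','_'])]) ++ [(('[', '2'), ['n','_'])]) ++ [((',', '3'), ['n','_'])]) ++ [(('[', '3'), ['n','_'])]) ++ [((',', '4'), ['n','_'])]) ++ [(('[', '4'), ['n','_'])]) ++ [((',', '5'), ['n','_'])]) ++ [(('[', '5'), ['n','_'])]) ++ [((',', '6'), ['n','_'])])) ([(('[', '6'), ['n','_'])]) (by decide)]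
    rw [← repPair_pins ',' '7' ['n','_'] (by decide) (pvPins ((((((((((((((([((',', '_'), ['z'])] ++ [(('[', '_'), ['z'])]) ++ [((',', '0'), ['n','_'])]) ++ [(('[', '0'), ['n','_'])]) ++ [((',', '1'), ['n','_'])]) ++ [(('[', '1'), ['n','_'])]) ++ [((',', '2'), ['n','_'])]) ++ [(('[', '2'), ['n','_'])]) ++ [((',', '3'), ['n','_'])]) ++ [(('[', '3'), ['n','_'])]) ++ [((',', '4'), ['n','_'])]) ++ [(('[', '4'), ['n','_'])]) ++ [((',', '5'), ['n','_'])]) ++ [(('[', '5'), ['n','_'])]) ++ [((',', '6'), ['n','_'])]) ++ [(('[', '6'), ['n','_'])]) none m) none (none_cond _ _ _)]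
    rw [pins_fuse (((((((((((((((([((',', '_'), ['z'])] ++ [(('[', '_'), ['z'])]) ++ [((',', '0'), ['n','_'])]) ++ [(('[', '0'), ['n','_'])]) ++ [((',', '1'), ['n','_'])]) ++ [(('[', '1'), ['n','_'])]) ++ [((',', '2'), ['n','_'])]) ++ [(('[', '2'), ['n','_'])]) ++ [((',', '3'), ['n','_'])]) ++ [(('[', '3'), ['n','_'])]) ++ [((',', '4'), ['n','_'])]) ++ [(('[', '4'), ['n','_'])]) ++ [((',', '5'), ['n','_'])]) ++ [(('[', '5'), ['n','_'])]) ++ [((',', '6'), ['n','_'])]) ++ [(('[', '6'), ['n','_'])])) ([((',', '7'), ['n','_'])]) (by decide)]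
    rw [← repPair_pins '[' '7' ['n','_'] (by decide) (pvPins (((((((((((((((([((',', '_'), ['z'])] ++ [(('[', '_'), ['z'])]) ++ [((',', '0'), ['n','_'])]) ++ [(('[', '0'), ['n','_'])]) ++ [((',', '1'), ['n','_'])]) ++ [(('[', '1'), ['n','_'])]) ++ [((',', '2'), ['n','_'])]) ++ [(('[', '2'), ['n','_'])]) ++ [((',', '3'), ['n','_'])]) ++ [(('[', '3'), ['n','_'])]) ++ [((',', '4'), ['n','_'])]) ++ [(('[', '4'), ['n','_'])]) ++ [((',', '5'), ['n','_'])]) ++ [(('[', '5'), ['n','_'])]) ++ [((',', '6'), ['n','_'])]) ++ [(('[', '6'), ['n','_'])]) ++ [((',', '7'), ['n','_'])]) none m) none (none_cond _ _ _)]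
    rw [pins_fuse ((((((((((((((((([((',', '_'), ['z'])] ++ [(('[', '_'), ['z'])]) ++ [((',', '0'), ['n','_'])]) ++ [(('[', '0'), ['n','_'])]) ++ [((',', '1'), ['n','_'])]) ++ [(('[', '1'), ['n','_'])]) ++ [((',', '2'), ['n','_'])]) ++ [(('[', '2'), ['n','_'])]) ++ [((',', '3'), ['n','_'])]) ++ [(('[', '3'), ['n','_'])]) ++ [((',', '4'), ['n','_'])]) ++ [(('[', '4'), ['n','_'])]) ++ [((',', '5'), ['n','_'])]) ++ [(('[', '5'), ['n','_'])]) ++ [((',', '6'), ['n','_'])]) ++ [(('[', '6'), ['n','_'])]) ++ [((',', '7'), ['n','_'])])) ([(('[', '7'), ['n','_'])]) (by decide)]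
    rw [← repPair_pins ',' '8' ['n','_'] (by decide) (pvPins ((((((((((((((((([((',', '_'), ['z'])] ++ [(('[', '_'), ['z'])]) ++ [((',', '0'), ['n','_'])]) ++ [(('[', '0'), ['n','_'])]) ++ [((',', '1'), ['n','_'])]) ++ [(('[', '1'), ['n','_'])]) ++ [((',', '2'), ['n','_'])]) ++ [(('[', '2'), ['n','_'])]) ++ [((',', '3'), ['n','_'])]) ++ [(('[', '3'), ['n','_'])]) ++ [((',', '4'), ['n','_'])]) ++ [(('[', '4'), ['n','_'])]) ++ [((',', '5'), ['n','_'])]) ++ [(('[', '5'), ['n','_'])]) ++ [((',', '6'), ['n','_'])]) ++ [(('[', '6'), ['n','_'])]) ++ [((',', '7'), ['n','_'])]) ++ [(('[', '7'), ['n','_'])]) none m) none (none_cond _ _ _)]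
    rw [pins_fuse (((((((((((((((((([((',', '_'), ['z'])] ++ [(('[', '_'), ['z'])]) ++ [((',', '0'), ['n','_'])]) ++ [(('[', '0'), ['n','_'])]) ++ [((',', '1'), ['n','_'])]) ++ [(('[', '1'), ['n','_'])]) ++ [((',', '2'), ['n','_'])]) ++ [(('[', '2'), ['n','_'])]) ++ [((',', '3'), ['n','_'])]) ++ [(('[', '3'), ['n','_'])]) ++ [((',', '4'), ['n','_'])]) ++ [(('[', '4'), ['n','_'])]) ++ [((',', '5'), ['n','_'])]) ++ [(('[', '5'), ['n','_'])]) ++ [((',', '6'), ['n','_'])]) ++ [(('[', '6'), ['n','_'])]) ++ [((',', '7'), ['n','_'])]) ++ [(('[', '7'), ['n','_'])])) ([((',', '8'), ['n','_'])]) (by decide)]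
    rw [← repPair_pins '[' '8' ['n','_'] (by decide) (pvPins (((((((((((((((((([((',', '_'), ['z'])] ++ [(('[', '_'), ['z'])]) ++ [((',', '0'), ['n','_'])]) ++ [(('[', '0'), ['n','_'])]) ++ [((',', '1'), ['n','_'])]) ++ [(('[', '1'), ['n','_'])]) ++ [((',', '2'), ['n','_'])]) ++ [(('[', '2'), ['n','_'])]) ++ [((',', '3'), ['n','_'])]) ++ [(('[', '3'), ['n','_'])]) ++ [((',', '4'), ['n','_'])]) ++ [(('[', '4'), ['n','_'])]) ++ [((',', '5'), ['n','_'])]) ++ [(('[', '5'), ['n','_'])]) ++ [((',', '6'), ['n','_'])]) ++ [(('[', '6'), ['n','_'])]) ++ [((',', '7'), ['n','_'])]) ++ [(('[', '7'), ['n','_'])]) ++ [((',', '8'), ['n','_'])]) none m) none (none_cond _ _ _)]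
    rw [pins_fuse ((((((((((((((((((([((',', '_'), ['z'])] ++ [(('[', '_'), ['z'])]) ++ [((',', '0'), ['n','_'])]) ++ [(('[', '0'), ['n','_'])]) ++ [((',', '1'), ['n','_'])]) ++ [(('[', '1'), ['n','_'])]) ++ [((',', '2'), ['n','_'])]) ++ [(('[', '2'), ['n','_'])]) ++ [((',', '3'), ['n','_'])]) ++ [(('[', '3'), ['n','_'])]) ++ [((',', '4'), ['n','_'])]) ++ [(('[', '4'), ['n','_'])]) ++ [((',', '5'), ['n','_'])]) ++ [(('[', '5'), ['n','_'])]) ++ [((',', '6'), ['n','_'])]) ++ [(('[', '6'), ['n','_'])]) ++ [((',', '7'), ['n','_'])]) ++ [(('[', '7'), ['n','_'])]) ++ [((',', '8'), ['n','_'])])) ([(('[', '8'), ['n','_'])]) (by decide)]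
    rw [← repPair_pins ',' '9' ['n','_'] (by decide) (pvPins ((((((((((((((((((([((',', '_'), ['z'])] ++ [(('[', '_'), ['z'])]) ++ [((',', '0'), ['n','_'])]) ++ [(('[', '0'), ['n','_'])]) ++ [((',', '1'), ['n','_'])]) ++ [(('[', '1'), ['n','_'])]) ++ [((',', '2'), ['n','_'])]) ++ [(('[', '2'), ['n','_'])]) ++ [((',', '3'), ['n','_'])]) ++ [(('[', '3'), ['n','_'])]) ++ [((',', '4'), ['n','_'])]) ++ [(('[', '4'), ['n','_'])]) ++ [((',', '5'), ['n','_'])]) ++ [(('[', '5'), ['n','_'])]) ++ [((',', '6'), ['n','_'])]) ++ [(('[', '6'), ['n','_'])]) ++ [((',', '7'), ['n','_'])]) ++ [(('[', '7'), ['n','_'])]) ++ [((',', '8'), ['n','_'])]) ++ [(('[', '8'), ['n','_'])]) none m) none (none_cond _ _ _)]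
    rw [pins_fuse (((((((((((((((((((([((',', '_'), ['z'])] ++ [(('[', '_'), ['z'])]) ++ [((',', '0'), ['n','_'])]) ++ [(('[', '0'), ['n','_'])]) ++ [((',', '1'), ['n','_'])]) ++ [(('[', '1'), ['n','_'])]) ++ [((',', '2'), ['n','_'])]) ++ [(('[', '2'), ['n','_'])]) ++ [((',', '3'), ['n','_'])]) ++ [(('[', '3'), ['n','_'])]) ++ [((',', '4'), ['n','_'])]) ++ [(('[', '4'), ['n','_'])]) ++ [((',', '5'), ['n','_'])]) ++ [(('[', '5'), ['n','_'])]) ++ [((',', '6'), ['n','_'])]) ++ [(('[', '6'), ['n','_'])]) ++ [((',', '7'), ['n','_'])]) ++ [(('[', '7'), ['n','_'])]) ++ [((',', '8'), ['n','_'])]) ++ [(('[', '8'), ['n','_'])])) ([((',', '9'), ['n','_'])]) (by decide)]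
    rw [← repPair_pins '[' '9' ['n','_'] (by decide) (pvPins (((((((((((((((((((([((',', '_'), ['z'])] ++ [(('[', '_'), ['z'])]) ++ [((',', '0'), ['n','_'])]) ++ [(('[', '0'), ['n','_'])]) ++ [((',', '1'), ['n','_'])]) ++ [(('[', '1'), ['n','_'])]) ++ [((',', '2'), ['n','_'])]) ++ [(('[', '2'), ['n','_'])]) ++ [((',', '3'), ['n','_'])]) ++ [(('[', '3'), ['n','_'])]) ++ [((',', '4'), ['n','_'])]) ++ [(('[', '4'), ['n','_'])]) ++ [((',', '5'), ['n','_'])]) ++ [(('[', '5'), ['n','_'])]) ++ [((',', '6'), ['n','_'])]) ++ [(('[', '6'), ['n','_'])]) ++ [((',', '7'), ['n','_'])]) ++ [(('[', '7'), ['n','_'])]) ++ [((',', '8'), ['n','_'])]) ++ [(('[', '8'), ['n','_'])]) ++ [((',', '9'), ['n','_'])]) none m) none (none_cond _ _ _)]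
    rw [pins_fuse ((((((((((((((((((((([((',', '_'), ['z'])] ++ [(('[', '_'), ['z'])]) ++ [((',', '0'), ['n','_'])]) ++ [(('[', '0'), ['n','_'])]) ++ [((',', '1'), ['n','_'])]) ++ [(('[', '1'), ['n','_'])]) ++ [((',', '2'), ['n','_'])]) ++ [(('[', '2'), ['n','_'])]) ++ [((',', '3'), ['n','_'])]) ++ [(('[', '3'), ['n','_'])]) ++ [((',', '4'), ['n','_'])]) ++ [(('[', '4'), ['n','_'])]) ++ [((',', '5'), ['n','_'])]) ++ [(('[', '5'), ['n','_'])]) ++ [((',', '6'), ['n','_'])]) ++ [(('[', '6'), ['n','_'])]) ++ [((',', '7'), ['n','_'])]) ++ [(('[', '7'), ['n','_'])]) ++ [((',', '8'), ['n','_'])]) ++ [(('[', '8'), ['n','_'])]) ++ [((',', '9'), ['n','_'])])) ([(('[', '9'), ['n','_'])]) (by decide)]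
    rfl
  rw [key]
  rw [pins_goB s.toList none]
  rfl
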